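-- pv_equiv track=rewrite | github.com/Neonat/iDopa | src/scheduler.py | is_valid_schedule
-- ===== SOURCE A (Python) =====
-- workers = ["Alice", "Bob", "Charlie", "Diana"]
--
-- shifts = ["Monday Morning", "Monday Evening", "Tuesday Morning", "Tuesday Evening"]
--
-- min_shifts = 1
--
-- def is_valid_schedule(schedule):
--     # Check if each shift is assigned to exactly one worker
--     for shift in shifts:
--         assigned_workers = [worker for worker in workers if schedule.get((worker, shift), 0) == 1]
--         if len(assigned_workers) != 1:
--             return False
--
--     # Check if each worker meets the minimum number of shifts
--     for worker in workers:
--         total_shifts = sum(schedule.get((worker, shift), 0) for shift in shifts)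
--         if total_shifts < min_shifts:
--             return False
--
--     return True
-- ===== SOURCE B (Python) =====
-- workers = ["Alice", "Bob", "Charlie", "Diana"]
--
-- shifts = ["Monday Morning", "Monday Evening", "Tuesday Morning", "Tuesday Evening"]
--
-- min_shifts = 1
--
-- def is_valid_schedule(schedule):
--     # One pass over workers x shifts: tally per-shift count of cells equal to 1
--     # and per-worker raw-value sum, then verify both tables.
--     counts = [0] * len(shifts)
--     totals = [0] * len(workers)
--     for i, worker in enumerate(workers):
--         for j, shift in enumerate(shifts):
--             v = schedule.get((worker, shift), 0)
--             counts[j] += 1 if v == 1 else 0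
--             totals[i] += v
--     return all(c == 1 for c in counts) and all(t >= min_shifts for t in totals)
-- ===== Notes on version B (the rewrite author's own statement) =====
-- stated objective: alternative
-- what changed: Instead of A's per-shift filter pass followed by a per-worker summing pass (each re-scanning the schedule), B makes one pass over workers x shifts tallying a per-shift count of cells equal to 1 and a per-worker raw-value sum into two tables, then checks the tables.
import Mathlib
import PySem

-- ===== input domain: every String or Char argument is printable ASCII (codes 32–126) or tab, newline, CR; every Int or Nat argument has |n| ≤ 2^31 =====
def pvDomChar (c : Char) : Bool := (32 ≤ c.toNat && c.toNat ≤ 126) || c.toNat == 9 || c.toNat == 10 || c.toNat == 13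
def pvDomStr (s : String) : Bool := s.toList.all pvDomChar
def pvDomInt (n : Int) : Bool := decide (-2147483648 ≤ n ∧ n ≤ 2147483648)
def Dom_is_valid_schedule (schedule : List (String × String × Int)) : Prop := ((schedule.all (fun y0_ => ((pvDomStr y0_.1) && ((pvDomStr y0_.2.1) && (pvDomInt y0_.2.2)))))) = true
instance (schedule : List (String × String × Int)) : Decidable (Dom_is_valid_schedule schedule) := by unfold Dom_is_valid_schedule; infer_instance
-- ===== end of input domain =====

-- B replaces A's two re-scanning passes (per-shift filter, per-worker sum) by one tallying
-- pass over workers×shifts building per-shift and per-worker tables, then checks the tables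
-- (alternative decomposition, same cost).

-- module constants
def pvWorkers : List String := ["Alice", "Bob", "Charlie", "Diana"]
def pvShifts : List String := ["Monday Morning", "Monday Evening", "Tuesday Morning", "Tuesday Evening"]
def pvMinShifts : Int := 1

-- schedule.get((worker, shift), 0): first matching (worker, shift) entry, default 0
def pvGet (schedule : List (String × String × Int)) (w s : String) : Int :=
  match schedule.find? (fun e => e.1 == w && e.2.1 == s) with
  | some e => e.2.2
  | none => 0

-- ===== PORT A =====
def is_valid_schedule (schedule : List (String × String × Int)) : Bool :=
  (pvShifts.all (fun shift =>
      ((pvWorkers.filter (fun worker => pvGet schedule worker shift == 1)).length == 1)))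
  &&
  (pvWorkers.all (fun worker =>
      !(decide ((pvShifts.map (fun shift => pvGet schedule worker shift)).sum < pvMinShifts))))

-- ===== PORT B =====
-- enumerate → List.zipIdx (Nat indices); counts[j] += …, totals[i] += … → List.set/getD
-- (exact: j < len shifts and i < len workers always hold)
def is_valid_schedule_alt (schedule : List (String × String × Int)) : Bool :=
  let init : List Int × List Int :=
    (List.replicate pvShifts.length 0, List.replicate pvWorkers.length 0)
  let st := pvWorkers.zipIdx.foldl (fun st wi =>
      pvShifts.zipIdx.foldl (fun st sj =>
          let v := pvGet schedule wi.1 sj.1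
          (st.1.set sj.2 (st.1.getD sj.2 0 + (if v == 1 then 1 else 0)),
           st.2.set wi.2 (st.2.getD wi.2 0 + v))) st)
    init
  (st.1.all (fun c => c == 1)) && (st.2.all (fun t => decide (pvMinShifts ≤ t)))

-- ===== PRECONDITION & SPEC =====
def Spec_is_valid_schedule (schedule : List (String × String × Int)) (out : Bool) : Prop := out = is_valid_schedule_alt schedule
instance (schedule : List (String × String × Int)) (out : Bool) : Decidable (Spec_is_valid_schedule schedule out) := by unfold Spec_is_valid_schedule; infer_instance

-- ===== CLAIM (what is proved, stated in full; the proofs are below) =====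
def Claim_equal_is_valid_schedule : Prop := ∀ (schedule : List (String × String × Int)), Dom_is_valid_schedule schedule → Spec_is_valid_schedule schedule (is_valid_schedule schedule)

-- ===== LEMMAS AND PROOFS =====

-- exactly-one-assigned test: the length-of-filter form (A) equals the indicator-count form (B)
theorem countLem (P Q R S : Prop) [Decidable P] [Decidable Q] [Decidable R] [Decidable S]
    (w x y z : String) :
    ((if P then
        w :: if Q then x :: (if R then y :: (if S then [z] else []) else if S then [z] else [])
          else if R then y :: (if S then [z] else []) else if S then [z] else []
      else if Q then x :: (if R then y :: (if S then [z] else []) else if S then [z] else [])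
          else if R then y :: (if S then [z] else []) else if S then [z] else []).length == 1)
    = ((((((0 : Int) + if P then 1 else 0) + if Q then 1 else 0) + if R then 1 else 0) +
        if S then 1 else 0) == 1) := by
  by_cases P <;> by_cases Q <;> by_cases R <;> by_cases S <;> simp [*]

-- the two sides agree for an arbitrary cell-value table f
theorem main_eq_aux (f : String → String → Int) :
    ((pvShifts.all (fun shift =>
      ((pvWorkers.filter (fun worker => f worker shift == 1)).length == 1)))
  &&
  (pvWorkers.all (fun worker =>
      !(decide ((pvShifts.map (fun shift => f worker shift)).sum < pvMinShifts)))))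
  = (
  let init : List Int × List Int :=
    (List.replicate pvShifts.length 0, List.replicate pvWorkers.length 0)
  let st := pvWorkers.zipIdx.foldl (fun st wi =>
      pvShifts.zipIdx.foldl (fun st sj =>
          let v := f wi.1 sj.1
          (st.1.set sj.2 (st.1.getD sj.2 0 + (if v == 1 then 1 else 0)),
           st.2.set wi.2 (st.2.getD wi.2 0 + v))) st)
    init
  (st.1.all (fun c => c == 1)) && (st.2.all (fun t => decide (pvMinShifts ≤ t)))) := by
  simp only [pvWorkers, pvShifts, pvMinShifts, List.zipIdx_cons, List.zipIdx_nil,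
    List.foldl_cons, List.foldl_nil, List.all_cons, List.all_nil, List.filter_cons, List.filter_nil,
    List.map_cons, List.map_nil, List.sum_cons, List.sum_nil, List.length_cons, List.length_nil,
    List.replicate_succ, List.replicate_zero,
    List.set_cons_zero, List.set_cons_succ, List.getD_cons_zero, List.getD_cons_succ]
  simp only [countLem]
  congr 1
  rw [Bool.eq_iff_iff]
  simp [not_lt]
  omega

-- ===== VERDICT (by name: the statement is the Claim_ definition above) =====
theorem is_valid_schedule_spec : Claim_equal_is_valid_schedule := by
  intro schedule _
  exact main_eq_aux (pvGet schedule)
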